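-- pv_equiv track=rewrite | github.com/randomLevelup/algocomps | comp2-markov/preprocess.py | split_long_notes
-- ===== SOURCE A (Python) =====
-- def split_long_notes(pitch, duration_24ths):
--     """
--     Split notes longer than a quarter note into multiple quarter-note-or-shorter segments.
--     """
--     segments = []
--     remaining = duration_24ths
--
--     while remaining > 0:
--         # If remaining duration is more than a quarter note
--         if remaining > 24:
--             segments.append((pitch, 24))  # Add a quarter note
--             remaining -= 24
--         else:
--             segments.append((pitch, remaining))  # Add the remaining duration
--             remaining = 0
--
--     return segments
-- ===== SOURCE B (Python) =====
-- def split_long_notes(pitch, duration_24ths):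
--     """Split a duration into quarter-note (24) segments via divmod instead of a decrement loop."""
--     if duration_24ths <= 0:
--         return []
--     full, rem = divmod(duration_24ths, 24)
--     segments = [(pitch, 24)] * full
--     if rem > 0:
--         segments.append((pitch, rem))
--     return segments
-- ===== Notes on version B (the rewrite author's own statement) =====
-- stated objective: simpler
-- what changed: Replaces the decrement-by-24 while loop with a single divmod: the quarter-note count is computed up front and the segment list built by list replication plus an optional remainder tuple.
import Mathlib
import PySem

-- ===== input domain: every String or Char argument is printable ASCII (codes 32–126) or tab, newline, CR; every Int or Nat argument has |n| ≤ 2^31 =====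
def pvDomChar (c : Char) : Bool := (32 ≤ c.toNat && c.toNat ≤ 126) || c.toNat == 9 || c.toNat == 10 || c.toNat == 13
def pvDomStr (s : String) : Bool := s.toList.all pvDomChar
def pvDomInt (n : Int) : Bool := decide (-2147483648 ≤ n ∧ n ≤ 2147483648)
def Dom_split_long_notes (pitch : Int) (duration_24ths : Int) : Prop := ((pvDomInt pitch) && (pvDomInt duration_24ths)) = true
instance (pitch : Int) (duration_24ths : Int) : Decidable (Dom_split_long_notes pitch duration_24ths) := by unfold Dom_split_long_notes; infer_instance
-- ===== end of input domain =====

-- B replaces A's decrement-by-24 while loop with one divmod: segment count computed up front,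
-- list built by replication plus an optional remainder tuple (objective: simpler).


-- ===== PORT A =====
-- the while loop: state = (remaining, segments accumulator)
def splitGo (pitch : Int) (remaining : Int) (segments : List (Int × Int)) : List (Int × Int) :=
  if remaining > 0 then
    if remaining > 24 then
      splitGo pitch (remaining - 24) (segments ++ [(pitch, 24)])
    else
      segments ++ [(pitch, remaining)]
  else segments
termination_by remaining.toNat
decreasing_by omega

def split_long_notes (pitch : Int) (duration_24ths : Int) : List (Int × Int) :=
  splitGo pitch duration_24ths []

-- ===== PORT B =====
def split_long_notes_alt (pitch : Int) (duration_24ths : Int) : List (Int × Int) :=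
  if duration_24ths ≤ 0 then []
  else
    List.replicate (PySem.Int.floordiv duration_24ths 24).toNat (pitch, 24) ++
      (if PySem.Int.mod duration_24ths 24 > 0 then [(pitch, PySem.Int.mod duration_24ths 24)] else [])

-- ===== PRECONDITION & SPEC =====
def Spec_split_long_notes (pitch : Int) (duration_24ths : Int) (out : List (Int × Int)) : Prop := out = split_long_notes_alt pitch duration_24ths
instance (pitch : Int) (duration_24ths : Int) (out : List (Int × Int)) : Decidable (Spec_split_long_notes pitch duration_24ths out) := by unfold Spec_split_long_notes; infer_instance

-- ===== CLAIM (what is proved, stated in full; the proofs are below) =====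
def Claim_equal_split_long_notes : Prop := ∀ (pitch : Int) (duration_24ths : Int), Dom_split_long_notes pitch duration_24ths → Spec_split_long_notes pitch duration_24ths (split_long_notes pitch duration_24ths)

-- ===== LEMMAS AND PROOFS =====

lemma alt_nonpos (pitch d : Int) (h : d ≤ 0) : split_long_notes_alt pitch d = [] := by
  simp [split_long_notes_alt, h]

lemma alt_small (pitch d : Int) (h0 : 0 < d) (h24 : d ≤ 24) :
    split_long_notes_alt pitch d = [(pitch, d)] := by
  unfold split_long_notes_alt
  rw [if_neg (by omega),
      PySem.Int.floordiv_eq_ediv_of_pos (by norm_num : (0:Int) < 24),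
      PySem.Int.mod_eq_emod_of_pos (by norm_num : (0:Int) < 24)]
  rcases eq_or_lt_of_le h24 with h | h
  · subst h; norm_num
  · have hd : d / 24 = 0 := by omega
    have hm : d % 24 = d := by omega
    simp [hd, hm, h0]

lemma alt_big (pitch d : Int) (h : 24 < d) :
    split_long_notes_alt pitch d = (pitch, 24) :: split_long_notes_alt pitch (d - 24) := by
  have h1 : ¬ d ≤ 0 := by omega
  have h2 : ¬ d - 24 ≤ 0 := by omega
  simp only [split_long_notes_alt, if_neg h1, if_neg h2,
      PySem.Int.floordiv_eq_ediv_of_pos (by norm_num : (0:Int) < 24),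
      PySem.Int.mod_eq_emod_of_pos (by norm_num : (0:Int) < 24)]
  have hmod : d % 24 = (d - 24) % 24 := by omega
  have hpos : 0 ≤ (d - 24) / 24 := Int.ediv_nonneg (by omega) (by norm_num)
  have htn : (d / 24).toNat = ((d - 24) / 24).toNat + 1 := by omega
  rw [hmod, htn, List.replicate_succ]
  split <;> simp

lemma go_eq (pitch : Int) : ∀ n (d : Int) (acc : List (Int × Int)), d.toNat = n →
    splitGo pitch d acc = acc ++ split_long_notes_alt pitch d := by
  intro n
  induction n using Nat.strong_induction_on with
  | _ n ih =>
    intro d acc hn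
    rw [splitGo]
    by_cases hpos : d > 0
    · rw [if_pos hpos]
      by_cases hbig : d > 24
      · rw [if_pos hbig]
        rw [ih (d - 24).toNat (by omega) (d - 24) _ rfl, alt_big pitch d hbig]
        simp
      · rw [if_neg hbig, alt_small pitch d hpos (by omega)]
    · rw [if_neg hpos, alt_nonpos pitch d (by omega)]
      simp

-- ===== VERDICT (by name: the statement is the Claim_ definition above) =====
theorem split_long_notes_spec : Claim_equal_split_long_notes := by
  intro pitch d _
  unfold Spec_split_long_notes split_long_notes
  simpa using go_eq pitch d.toNat d [] rfl
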